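-- pv_equiv track=rewrite | github.com/ashishki/Signal_Count | app/api/jobs.py | _rollup_status
-- ===== SOURCE A (Python) =====
-- def _rollup_status(statuses: list[str]) -> str:
--     normalized = [status.strip().lower() for status in statuses if status]
--     if not normalized:
--         return "missing"
--     if "failed" in normalized:
--         return "failed"
--     if "missing" in normalized:
--         return "missing"
--     if normalized and all(status == "verified" for status in normalized):
--         return "verified"
--     if "validated" in normalized:
--         return "validated"
--     return "present"
-- ===== SOURCE B (Python) =====
-- def _rollup_status(statuses: list[str]) -> str:
--     best = -1
--     for status in statuses:
--         if status:
--             s = status.strip().lower()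
--             r = 4 if s == "failed" else 3 if s == "missing" else 2 if s == "validated" else 0 if s == "verified" else 1
--             if r > best:
--                 best = r
--     if best < 0:
--         return "missing"
--     return ["verified", "present", "validated", "missing", "failed"][best]
-- ===== Notes on version B (the rewrite author's own statement) =====
-- stated objective: alternative
-- what changed: Replaces the staged membership scans and the all(...) rescan with a single-pass max-severity fold: each status maps to a numeric rank and the running maximum is decoded by a lookup table.
import Mathlib
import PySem

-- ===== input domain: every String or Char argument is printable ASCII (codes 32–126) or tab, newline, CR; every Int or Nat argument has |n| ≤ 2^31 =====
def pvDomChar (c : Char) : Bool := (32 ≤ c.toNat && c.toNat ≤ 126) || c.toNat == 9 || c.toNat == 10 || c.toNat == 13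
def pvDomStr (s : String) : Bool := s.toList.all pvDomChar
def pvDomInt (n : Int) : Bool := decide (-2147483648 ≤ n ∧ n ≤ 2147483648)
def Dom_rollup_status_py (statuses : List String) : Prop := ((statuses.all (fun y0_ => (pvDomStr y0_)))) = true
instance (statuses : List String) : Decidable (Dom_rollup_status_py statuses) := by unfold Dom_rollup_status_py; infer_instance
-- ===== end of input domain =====

-- B replaces A's staged membership scans and all(...) rescan with a single-pass max-severity fold decoded by a lookup table (alternative decomposition, same cost).

-- ===== PORT A =====
def rollup_status_py (statuses : List String) : String :=
  let normalized := (statuses.filter (fun st => st ≠ "")).map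
    (fun st => PySem.Str.lower (PySem.Str.strip st))
  if normalized = [] then "missing"
  else if "failed" ∈ normalized then "failed"
  else if "missing" ∈ normalized then "missing"
  else if normalized ≠ [] ∧ ∀ st ∈ normalized, st = "verified" then "verified"
  else if "validated" ∈ normalized then "validated"
  else "present"

-- ===== PORT B =====
-- the conditional-expression chain computing r in Source B
def rankOf (s : String) : Int :=
  if s = "failed" then 4
  else if s = "missing" then 3
  else if s = "validated" then 2
  else if s = "verified" then 0
  else 1

def rollup_status_py_alt (statuses : List String) : String :=
  let best := statuses.foldl
    (fun b st =>
      if st ≠ "" then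
        let r := rankOf (PySem.Str.lower (PySem.Str.strip st))
        if r > b then r else b
      else b) (-1)
  if best < 0 then "missing"
  else ((PySem.List.pyGet? ["verified", "present", "validated", "missing", "failed"] best).getD "")
  -- the .getD "" branch is unreachable: best ∈ {0,…,4} here, always in range

-- ===== PRECONDITION & SPEC =====
def Spec_rollup_status_py (statuses : List String) (out : String) : Prop := out = rollup_status_py_alt statuses
instance (statuses : List String) (out : String) : Decidable (Spec_rollup_status_py statuses out) := by unfold Spec_rollup_status_py; infer_instance

-- ===== CLAIM (what is proved, stated in full; the proofs are below) =====
def Claim_equal_rollup_status_py : Prop := ∀ (statuses : List String), Dom_rollup_status_py statuses → Spec_rollup_status_py statuses (rollup_status_py statuses)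

-- ===== LEMMAS AND PROOFS =====

-- B's fold over the raw list equals the max-rank fold over A's normalized list
def maxRank (ns : List String) (b : Int) : Int :=
  ns.foldl (fun b s => if rankOf s > b then rankOf s else b) b

def stepB (b : Int) (st : String) : Int :=
  if st ≠ "" then
    let r := rankOf (PySem.Str.lower (PySem.Str.strip st))
    if r > b then r else b
  else b

lemma fold_eq_maxRank (statuses : List String) (b : Int) :
    statuses.foldl
      (fun b st =>
        if st ≠ "" then
          let r := rankOf (PySem.Str.lower (PySem.Str.strip st))
          if r > b then r else b
        else b) b
    = maxRank ((statuses.filter (fun st => st ≠ "")).map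
        (fun st => PySem.Str.lower (PySem.Str.strip st))) b := by
  show statuses.foldl stepB b = _
  induction statuses generalizing b with
  | nil => rfl
  | cons st t ih =>
    rw [List.foldl_cons, List.filter_cons]
    by_cases h : st = ""
    · rw [if_neg (by simp [h]), show stepB b st = b by simp [stepB, h]]
      exact ih b
    · rw [if_pos (by simp [h]), List.map_cons,
        show stepB b st = (if rankOf (PySem.Str.lower (PySem.Str.strip st)) > b
          then rankOf (PySem.Str.lower (PySem.Str.strip st)) else b) by simp [stepB, h],
        maxRank, List.foldl_cons]
      exact ih _

lemma le_maxRank (ns : List String) (b : Int) : b ≤ maxRank ns b := by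
  induction ns generalizing b with
  | nil => exact le_refl b
  | cons s t ih =>
    simp only [maxRank, List.foldl_cons]
    by_cases h : rankOf s > b
    · simp only [if_pos h]; exact le_of_lt (lt_of_lt_of_le h (ih _))
    · simp only [if_neg h]; exact ih b

lemma mem_le_maxRank (ns : List String) (s : String) :
    s ∈ ns → ∀ (b : Int), rankOf s ≤ maxRank ns b := by
  induction ns with
  | nil => intro hs; cases hs
  | cons x t ih =>
    intro hs b
    simp only [maxRank, List.foldl_cons]
    rcases List.mem_cons.mp hs with h | h
    · subst h
      by_cases hgt : rankOf s > b
      · simp only [if_pos hgt]; exact le_maxRank t _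
      · simp only [if_neg hgt]
        exact le_trans (not_lt.mp hgt) (le_maxRank t b)
    · exact ih h _

lemma maxRank_cases (ns : List String) (b : Int) :
    maxRank ns b = b ∨ ∃ s ∈ ns, maxRank ns b = rankOf s := by
  induction ns generalizing b with
  | nil => exact Or.inl rfl
  | cons x t ih =>
    simp only [maxRank, List.foldl_cons]
    by_cases hgt : rankOf x > b
    · simp only [if_pos hgt]
      rcases ih (rankOf x) with h | ⟨s, hs, h⟩
      · exact Or.inr ⟨x, List.mem_cons_self .., h⟩
      · exact Or.inr ⟨s, List.mem_cons_of_mem _ hs, h⟩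
    · simp only [if_neg hgt]
      rcases ih b with h | ⟨s, hs, h⟩
      · exact Or.inl h
      · exact Or.inr ⟨s, List.mem_cons_of_mem _ hs, h⟩

lemma rankOf_le_four (s : String) : rankOf s ≤ 4 := by
  unfold rankOf; split_ifs <;> norm_num

lemma rankOf_eq_four (s : String) : rankOf s = 4 ↔ s = "failed" := by
  unfold rankOf; split_ifs with h1 h2 h3 h4 <;> simp_all

lemma rankOf_eq_three (s : String) : rankOf s = 3 ↔ s = "missing" := by
  unfold rankOf; split_ifs with h1 h2 h3 h4 <;> simp_all

lemma rankOf_eq_two (s : String) : rankOf s = 2 ↔ s = "validated" := by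
  unfold rankOf; split_ifs with h1 h2 h3 h4 <;> simp_all

lemma rankOf_eq_zero (s : String) : rankOf s = 0 ↔ s = "verified" := by
  unfold rankOf; split_ifs with h1 h2 h3 h4 <;> simp_all

lemma rankOf_nonneg (s : String) : 0 ≤ rankOf s := by
  unfold rankOf; split_ifs <;> norm_num

-- ===== VERDICT (by name: the statement is the Claim_ definition above) =====
theorem rollup_status_py_spec : Claim_equal_rollup_status_py := by
  intro statuses _
  unfold Spec_rollup_status_py rollup_status_py rollup_status_py_alt
  simp only [fold_eq_maxRank]
  set ns := (statuses.filter (fun st => st ≠ "")).map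
    (fun st => PySem.Str.lower (PySem.Str.strip st)) with hns
  by_cases h0 : ns = []
  · simp [h0, maxRank]
  · obtain ⟨x, t, hxt⟩ := List.exists_cons_of_ne_nil h0
    have hxmem : x ∈ ns := by rw [hxt]; exact List.mem_cons_self ..
    have hx0 : (0 : Int) ≤ maxRank ns (-1) :=
      le_trans (rankOf_nonneg x) (mem_le_maxRank ns x hxmem (-1))
    have hnotneg : ¬ maxRank ns (-1) < 0 := not_lt.mpr hx0
    simp only [if_neg h0, if_neg hnotneg]
    have hub : ∀ (k : Int), (∀ s ∈ ns, rankOf s ≤ k) → maxRank ns (-1) ≤ k := by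
      intro k hk
      rcases maxRank_cases ns (-1) with h | ⟨s, hs, h⟩
      · rw [h]; exact le_trans (by norm_num) (le_trans (rankOf_nonneg x) (hk x hxmem))
      · rw [h]; exact hk s hs
    by_cases hf : ("failed" : String) ∈ ns
    · have h4 : maxRank ns (-1) = 4 := by
        have hle := hub 4 (fun s _ => rankOf_le_four s)
        have hge := mem_le_maxRank ns _ hf (-1)
        rw [rankOf] at hge; simp at hge
        omega
      simp [hf, h4, PySem.List.pyGet?, PySem.List.pyIdx?]
    · simp only [if_neg hf]
      have hne4 : ∀ s ∈ ns, rankOf s ≤ 3 := by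
        intro s hs
        have := rankOf_le_four s
        rcases lt_or_eq_of_le this with h | h
        · omega
        · exact absurd (by rw [← (rankOf_eq_four s).mp h]; exact hs) hf
      by_cases hm : ("missing" : String) ∈ ns
      · have h3 : maxRank ns (-1) = 3 := by
          have hle := hub 3 hne4
          have hge := mem_le_maxRank ns _ hm (-1)
          rw [rankOf] at hge; simp at hge
          omega
        simp [hm, h3, PySem.List.pyGet?, PySem.List.pyIdx?]
      · simp only [if_neg hm]
        have hne3 : ∀ s ∈ ns, rankOf s ≤ 2 := by
          intro s hs
          have := hne4 s hs
          rcases lt_or_eq_of_le this with h | h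
          · omega
          · exact absurd (by rw [← (rankOf_eq_three s).mp h]; exact hs) hm
        by_cases hv : ∀ st ∈ ns, st = "verified"
        · have h0v : maxRank ns (-1) = 0 := by
            have hle := hub 0 (fun s hs => le_of_eq ((rankOf_eq_zero s).mpr (hv s hs)))
            omega
          rw [if_pos ⟨h0, hv⟩]
          simp [h0v, PySem.List.pyGet?, PySem.List.pyIdx?]
        · rw [if_neg (fun h => hv h.2)]
          obtain ⟨w, hw, hwv⟩ := not_forall₂.mp hv
          have hw1 : 1 ≤ rankOf w := by
            have h0w := rankOf_nonneg w
            rcases lt_or_eq_of_le h0w with h | h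
            · omega
            · exact absurd ((rankOf_eq_zero w).mp h.symm) hwv
          by_cases hval : ("validated" : String) ∈ ns
          · have h2 : maxRank ns (-1) = 2 := by
              have hle := hub 2 hne3
              have hge := mem_le_maxRank ns _ hval (-1)
              rw [rankOf] at hge; simp at hge
              omega
            simp [hval, h2, PySem.List.pyGet?, PySem.List.pyIdx?]
          · simp only [if_neg hval]
            have hne2 : ∀ s ∈ ns, rankOf s ≤ 1 := by
              intro s hs
              have := hne3 s hs
              rcases lt_or_eq_of_le this with h | h
              · omega
              · exact absurd (by rw [← (rankOf_eq_two s).mp h]; exact hs) hval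
            have h1 : maxRank ns (-1) = 1 := by
              have hle := hub 1 hne2
              have hge := le_trans hw1 (mem_le_maxRank ns w hw (-1))
              omega
            simp [h1, PySem.List.pyGet?, PySem.List.pyIdx?]
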